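-- pv_equiv track=rewrite | github.com/c2fablev/mozi_projektfeladat | mozi.py | helykereses
-- ===== SOURCE A (Python) =====
-- def helykereses(moziTerem:list, helyekSzama:int):
--     egybefuggo = 0
--     i = 1
--     for sor in moziTerem:
--         egybefuggo = 0
--         for hely in sor:
--             if hely == 0:
--                 egybefuggo += 1
--             else:
--                 egybefuggo = 0
--             if egybefuggo >= helyekSzama:
--                 return i
--         i += 1
-- ===== SOURCE B (Python) =====
-- def helykereses(moziTerem: list, helyekSzama: int):
--     for i, sor in enumerate(moziTerem, 1):
--         # positions of occupied seats, with virtual walls just before and after the row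
--         walls = [-1] + [j for j, hely in enumerate(sor) if hely != 0] + [len(sor)]
--         if max(b - a - 1 for a, b in zip(walls, walls[1:])) >= helyekSzama:
--             return i
--     return None
-- ===== Notes on version B (the rewrite author's own statement) =====
-- stated objective: alternative
-- what changed: Instead of A's running counter of consecutive zeros with an early return in the middle of a row, B computes for each row the positions of the occupied seats (plus virtual walls at -1 and len) and tests arithmetically whether the maximal gap between consecutive walls reaches helyekSzama.
-- intended difference: When helyekSzama <= 0 and the first row is empty, A accidentally skips empty rows and returns the first nonempty row's index (or None), while B returns 1, the intended value since an empty row trivially contains >= 0 consecutive free seats. — e.g. on helykereses([[]], 0): A returns none, B returns some 1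
import Mathlib
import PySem

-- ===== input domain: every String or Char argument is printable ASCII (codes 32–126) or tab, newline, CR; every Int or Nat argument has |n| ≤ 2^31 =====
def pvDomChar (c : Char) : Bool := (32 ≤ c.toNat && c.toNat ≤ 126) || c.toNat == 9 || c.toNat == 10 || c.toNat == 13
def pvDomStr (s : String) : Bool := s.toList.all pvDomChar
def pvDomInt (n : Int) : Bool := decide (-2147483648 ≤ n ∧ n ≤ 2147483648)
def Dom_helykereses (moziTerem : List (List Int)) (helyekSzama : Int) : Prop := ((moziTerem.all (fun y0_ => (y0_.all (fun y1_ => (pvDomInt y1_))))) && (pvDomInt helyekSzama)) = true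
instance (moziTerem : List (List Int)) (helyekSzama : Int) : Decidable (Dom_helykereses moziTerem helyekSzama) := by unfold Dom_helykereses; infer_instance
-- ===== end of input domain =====

-- B locates the occupied seats of each row and measures the gaps between consecutive
-- occupied positions arithmetically, instead of A's running counter with mid-row early
-- return (objective: alternative algorithm, same cost).

-- ===== PORT A =====
-- inner loop of A: running counter of consecutive zeros, returns true as soon as it reaches helyekSzama
def pvInnerA (k : Int) : List Int → Int → Bool
  | [], _ => false
  | h :: t, e =>
    let e' := if h == 0 then e + 1 else 0
    if e' ≥ k then true else pvInnerA k t e'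

-- outer loop of A: row counter i, egybefuggo reset to 0 at each row
def pvGoA (k : Int) : List (List Int) → Int → Option Int
  | [], _ => none
  | s :: r, i => if pvInnerA k s 0 then some i else pvGoA k r (i + 1)

def helykereses (moziTerem : List (List Int)) (helyekSzama : Int) : Option Int :=
  pvGoA helyekSzama moziTerem 1

-- ===== PORT B =====
-- [j for j, hely in enumerate(sor) if hely != 0]
def pvOcc (sor : List Int) (o : Int) : List Int :=
  ((PySem.List.enumerate sor o).filter (fun p => p.2 != 0)).map (fun p => p.1)

-- walls = [-1] + occupied positions + [len(sor)]
def pvWalls (sor : List Int) : List Int :=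
  -1 :: (pvOcc sor 0 ++ [(sor.length : Int)])

-- [b - a - 1 for a, b in zip(w, w[1:])]
def pvGaps (w : List Int) : List Int :=
  (w.zip w.tail).map (fun p => p.2 - p.1 - 1)

-- max(...): walls always has ≥ 2 entries, so the gap list is nonempty and max? is some;
-- the getD default 0 is never used
def pvMaxGap (sor : List Int) : Int :=
  (PySem.List.max? (pvGaps (pvWalls sor)) (fun x => x)).getD 0

def pvGoB (k : Int) : List (List Int) → Int → Option Int
  | [], _ => none
  | s :: r, i => if pvMaxGap s ≥ k then some i else pvGoB k r (i + 1)

def helykereses_alt (moziTerem : List (List Int)) (helyekSzama : Int) : Option Int :=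
  pvGoB helyekSzama moziTerem 1

-- ===== PRECONDITION & SPEC =====
-- When helyekSzama ≤ 0 and the FIRST row is empty, A accidentally skips empty rows and
-- returns the index of the first nonempty row (or None), while B returns 1, the intended
-- value: an empty row trivially contains ≥ 0 consecutive free seats.
def D_helykereses (moziTerem : List (List Int)) (helyekSzama : Int) : Prop :=
  helyekSzama ≤ 0 ∧ moziTerem.head? = some []
instance (moziTerem : List (List Int)) (helyekSzama : Int) : Decidable (D_helykereses moziTerem helyekSzama) := by unfold D_helykereses; infer_instance

def Spec_helykereses (moziTerem : List (List Int)) (helyekSzama : Int) (out : Option Int) : Prop := ¬ D_helykereses moziTerem helyekSzama → out = helykereses_alt moziTerem helyekSzama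
instance (moziTerem : List (List Int)) (helyekSzama : Int) (out : Option Int) : Decidable (Spec_helykereses moziTerem helyekSzama out) := by unfold Spec_helykereses; infer_instance

def pvDiffWitness_helykereses : List (List Int) × Int := ([[]], 0)
def pvDiffWitnessOut_helykereses : (Option Int) × (Option Int) := (none, some 1)

-- ===== CLAIM (what is proved, stated in full; the proofs are below) =====
def Claim_unchanged_helykereses : Prop := ∀ (moziTerem : List (List Int)) (helyekSzama : Int), Dom_helykereses moziTerem helyekSzama → Spec_helykereses moziTerem helyekSzama (helykereses moziTerem helyekSzama)
def Claim_changed_helykereses : Prop := Dom_helykereses (pvDiffWitness_helykereses.1) (pvDiffWitness_helykereses.2) ∧ D_helykereses (pvDiffWitness_helykereses.1) (pvDiffWitness_helykereses.2) ∧ helykereses (pvDiffWitness_helykereses.1) (pvDiffWitness_helykereses.2) = pvDiffWitnessOut_helykereses.1 ∧ helykereses_alt (pvDiffWitness_helykereses.1) (pvDiffWitness_helykereses.2) = pvDiffWitnessOut_helykereses.2 ∧ pvDiffWitnessOut_helykereses.1 ≠ pvDiffWitnessOut_helykereses.2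
def Claim_exact_helykereses : Prop := ∀ (moziTerem : List (List Int)) (helyekSzama : Int), Dom_helykereses moziTerem helyekSzama → D_helykereses moziTerem helyekSzama → helykereses moziTerem helyekSzama ≠ helykereses_alt moziTerem helyekSzama

-- ===== LEMMAS AND PROOFS =====

-- proof-side view of a row: the list of its maximal zero-run lengths (cur = current run)
def pvRuns : List Int → Int → List Int
  | [], c => [c]
  | h :: t, c => if h = 0 then pvRuns t (c + 1) else c :: pvRuns t 0

-- maximum of a nonempty list (0 on [], never used there)
def pvMaxNE : List Int → Int
  | [] => 0
  | a :: t => t.foldl max a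

theorem pvFoldlMaxInit (t : List Int) : ∀ a c : Int, t.foldl max (max c a) = max c (t.foldl max a) := by
  induction t with
  | nil => intro a c; rfl
  | cons h t ih =>
    intro a c
    simp only [List.foldl_cons]
    rw [max_assoc, ih]

theorem pvRunsShape (s : List Int) : ∀ c : Int, ∃ a t, pvRuns s c = a :: t := by
  induction s with
  | nil => intro c; exact ⟨c, [], rfl⟩
  | cons h t ih =>
    intro c
    by_cases h0 : h = 0
    · simpa [pvRuns, h0] using ih (c + 1)
    · exact ⟨c, pvRuns t 0, by simp [pvRuns, h0]⟩

theorem pvMaxNECons (c : Int) (a : Int) (l : List Int) :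
    pvMaxNE (c :: a :: l) = max c (pvMaxNE (a :: l)) := by
  simp only [pvMaxNE, List.foldl_cons]
  exact pvFoldlMaxInit l a c

theorem pvMaxNERunsGe (s : List Int) : ∀ c : Int, c ≤ pvMaxNE (pvRuns s c) := by
  induction s with
  | nil => intro c; simp [pvRuns, pvMaxNE]
  | cons h t ih =>
    intro c
    by_cases h0 : h = 0
    · simp only [pvRuns, if_pos h0]
      exact le_trans (by omega) (ih (c + 1))
    · simp only [pvRuns, if_neg h0]
      obtain ⟨a, l, he⟩ := pvRunsShape t 0
      rw [he, pvMaxNECons]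
      exact le_max_left _ _

theorem pvGapsCons (a b : Int) (r : List Int) :
    pvGaps (a :: b :: r) = (b - a - 1) :: pvGaps (b :: r) := by
  simp [pvGaps]

-- the gaps between walls are exactly the zero-run lengths
theorem pvGapsRuns (s : List Int) : ∀ o w : Int,
    pvGaps (w :: (pvOcc s o ++ [o + (s.length : Int)])) = pvRuns s (o - w - 1) := by
  induction s with
  | nil =>
    intro o w
    simp [pvOcc, pvGaps, pvRuns, PySem.List.enumerate]
  | cons h t ih =>
    intro o w
    by_cases h0 : h = 0
    · have hocc : pvOcc (h :: t) o = pvOcc t (o + 1) := by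
        simp [pvOcc, PySem.List.enumerate_cons, h0]
      have hlen : o + ((h :: t).length : Int) = (o + 1) + (t.length : Int) := by
        simp; ring
      rw [hocc, hlen, ih (o + 1) w]
      simp only [pvRuns, if_pos h0]
      congr 1
      ring
    · have hocc : pvOcc (h :: t) o = o :: pvOcc t (o + 1) := by
        simp [pvOcc, PySem.List.enumerate_cons, h0]
      have hlen : o + ((h :: t).length : Int) = (o + 1) + (t.length : Int) := by
        simp; ring
      rw [hocc, hlen]
      simp only [List.cons_append, pvGapsCons]
      rw [ih (o + 1) o]
      simp [pvRuns, h0]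

theorem pvMaxGapRuns (s : List Int) : pvMaxGap s = pvMaxNE (pvRuns s 0) := by
  have hw : pvGaps (pvWalls s) = pvRuns s 0 := by
    have := pvGapsRuns s 0 (-1)
    simpa [pvWalls] using this
  obtain ⟨a, t, he⟩ := pvRunsShape s 0
  rw [pvMaxGap, hw, he, PySem.List.max?_id_cons]
  simp [pvMaxNE]

theorem pvMaxGapNonneg (s : List Int) : 0 ≤ pvMaxGap s := by
  rw [pvMaxGapRuns]; exact pvMaxNERunsGe s 0

-- A's inner loop decides whether some zero run reaches k (for positive k, cur below k)
theorem pvInnerEq (k : Int) (hk : 0 < k) (s : List Int) :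
    ∀ cur : Int, cur < k → pvInnerA k s cur = decide (k ≤ pvMaxNE (pvRuns s cur)) := by
  induction s with
  | nil =>
    intro cur hc
    simp [pvInnerA, pvRuns, pvMaxNE]
    omega
  | cons h t ih =>
    intro cur hc
    simp only [pvInnerA]
    by_cases h0 : h = 0
    · have hb : (h == 0) = true := by simp [h0]
      simp only [hb, if_true]
      by_cases hge : cur + 1 ≥ k
      · rw [if_pos hge]
        have : k ≤ pvMaxNE (pvRuns (h :: t) cur) := by
          simp only [pvRuns, if_pos h0]
          exact le_trans hge (pvMaxNERunsGe t (cur + 1))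
        exact (decide_eq_true this).symm
      · rw [if_neg hge, ih (cur + 1) (by omega)]
        simp [pvRuns, h0]
    · have hb : (h == 0) = false := by simp [h0]
      simp only [hb, Bool.false_eq_true, if_false]
      have hng : ¬ ((0 : Int) ≥ k) := by omega
      rw [if_neg hng, ih 0 hk]
      simp only [pvRuns, if_neg h0]
      obtain ⟨a, l, he⟩ := pvRunsShape t 0
      rw [he, pvMaxNECons]
      have hiff : (k ≤ pvMaxNE (a :: l)) ↔ (k ≤ max cur (pvMaxNE (a :: l))) := by
        rcases max_cases cur (pvMaxNE (a :: l)) with ⟨hm, hle⟩ | ⟨hm, hle⟩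
        · rw [hm]; omega
        · rw [hm]
      exact decide_eq_decide.mpr hiff

-- row-level agreement for positive k
theorem pvRowEq (k : Int) (hk : 0 < k) (s : List Int) :
    pvInnerA k s 0 = decide (pvMaxGap s ≥ k) := by
  rw [pvInnerEq k hk s 0 hk, pvMaxGapRuns]

theorem pvGoEq (k : Int) (hk : 0 < k) (l : List (List Int)) :
    ∀ i : Int, pvGoA k l i = pvGoB k l i := by
  induction l with
  | nil => intro i; rfl
  | cons s r ih =>
    intro i
    simp only [pvGoA, pvGoB, pvRowEq k hk, ih]
    by_cases hc : pvMaxGap s ≥ k <;> simp [hc]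

-- k ≤ 0: A's inner loop fires at the very first seat of a nonempty row
theorem pvInnerNonpos (k : Int) (hk : k ≤ 0) (h : Int) (t : List Int) :
    pvInnerA k (h :: t) 0 = true := by
  simp only [pvInnerA]
  have : (if h == 0 then (0 : Int) + 1 else 0) ≥ k := by split <;> omega
  rw [if_pos this]

theorem pvGoAGe (k : Int) (l : List (List Int)) :
    ∀ i j : Int, pvGoA k l i = some j → i ≤ j := by
  induction l with
  | nil => intro i j h; simp [pvGoA] at h
  | cons s r ih =>
    intro i j h
    simp only [pvGoA] at h
    by_cases hc : pvInnerA k s 0 = true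
    · rw [if_pos hc] at h
      injection h with h
      omega
    · rw [if_neg hc] at h
      have := ih (i + 1) j h
      omega

-- ===== VERDICT (by name: the statements are the Claim_ definitions above) =====
theorem helykereses_spec : Claim_unchanged_helykereses := by
  intro mt k _hdom hnD
  unfold helykereses helykereses_alt
  by_cases hk : 0 < k
  · exact pvGoEq k hk mt 1
  · have hk0 : k ≤ 0 := by omega
    cases mt with
    | nil => rfl
    | cons s r =>
      cases s with
      | nil => exact absurd ⟨hk0, rfl⟩ hnD
      | cons h t =>
        have hA : pvInnerA k (h :: t) 0 = true := pvInnerNonpos k hk0 h t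
        have hB : pvMaxGap (h :: t) ≥ k := le_trans hk0 (pvMaxGapNonneg _)
        simp [pvGoA, pvGoB, hA, hB]

theorem helykereses_changed : Claim_changed_helykereses := by
  unfold Claim_changed_helykereses; decide

theorem helykereses_tight : Claim_exact_helykereses := by
  intro mt k _hdom hD
  obtain ⟨hk0, hhead⟩ := hD
  cases mt with
  | nil => simp at hhead
  | cons s r =>
    have hs : s = [] := by simpa using hhead
    subst hs
    unfold helykereses helykereses_alt
    have hA : pvInnerA k [] 0 = false := rfl
    have hB : pvMaxGap [] ≥ k := le_trans hk0 (pvMaxGapNonneg _)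
    have hBv : pvGoB k ([] :: r) 1 = some 1 := by
      simp [pvGoB, hB]
    have hAv : pvGoA k ([] :: r) 1 = pvGoA k r 2 := by
      norm_num [pvGoA, hA]
    rw [hAv, hBv]
    intro hcontra
    have := pvGoAGe k r 2 1 hcontra
    omega
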